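-- pv_equiv track=rewrite | github.com/mib912/Algorithms | 프로그래머스/2/12951. JadenCase 문자열 만들기/JadenCase 문자열 만들기.py | solution
-- ===== SOURCE A (Python) =====
-- def solution(s):
--     answer = []
--     sentence = s.split(' ')
--
--     for word in sentence:
--         if word:
--             answer.append(word[0].upper() + word[1:].lower())
--         else:
--             answer.append(word)
--     return " ".join(answer)
-- ===== SOURCE B (Python) =====
-- def solution(s):
--     out = []
--     start = True
--     for ch in s:
--         if ch == ' ':
--             out.append(' ')
--             start = True
--         else:
--             out.append(ch.upper() if start else ch.lower())
--             start = False
--     return "".join(out)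
-- ===== Notes on version B (the rewrite author's own statement) =====
-- stated objective: alternative
-- what changed: Replaces the split-on-space pipeline/per-word capitalize/join with a single left-to-right character scan that carries a start-of-word flag, uppercasing the first character after each space and lowercasing the rest.
import Mathlib
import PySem

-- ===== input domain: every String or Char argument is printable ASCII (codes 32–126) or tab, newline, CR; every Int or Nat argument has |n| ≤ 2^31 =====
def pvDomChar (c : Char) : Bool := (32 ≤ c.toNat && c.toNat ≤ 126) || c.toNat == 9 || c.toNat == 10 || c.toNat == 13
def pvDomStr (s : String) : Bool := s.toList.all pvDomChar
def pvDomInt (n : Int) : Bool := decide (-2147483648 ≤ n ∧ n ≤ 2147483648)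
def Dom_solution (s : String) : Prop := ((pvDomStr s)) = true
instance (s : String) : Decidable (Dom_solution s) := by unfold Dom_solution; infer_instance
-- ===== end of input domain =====

-- B replaces the split-on-space / per-word capitalize / join pipeline with a single character scan carrying a start-of-word flag; same cost, different decomposition.

-- ===== PORT A =====
-- A: split on single spaces, capitalize each nonempty word (first char upper, rest lower), join with single spaces.
def solution (s : String) : String :=
  let sentence := PySem.Chars.splitOn s.toList [' ']
  let answer := sentence.foldl (fun acc word =>
    match word with
    | [] => acc ++ [word]
    | c :: rest => acc ++ [PySem.Chars.upperChar c :: PySem.Chars.lower rest]) []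
  String.ofList (PySem.Chars.join [' '] answer)

-- ===== PORT B =====
-- B: one pass over the characters with a pair state (collected output, start-of-word flag).
def solution_alt (s : String) : String :=
  let st := s.toList.foldl (fun st ch =>
    if ch = ' ' then (st.1 ++ [' '], true)
    else (st.1 ++ [if st.2 then PySem.Chars.upperChar ch else PySem.Chars.lowerChar ch], false))
    (([] : List Char), true)
  String.ofList st.1

-- ===== PRECONDITION & SPEC =====
def Spec_solution (s : String) (out : String) : Prop := out = solution_alt s
instance (s : String) (out : String) : Decidable (Spec_solution s out) := by unfold Spec_solution; infer_instance

-- ===== CLAIM (what is proved, stated in full; the proofs are below) =====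
def Claim_equal_solution : Prop := ∀ (s : String), Dom_solution s → Spec_solution s (solution s)

-- ===== LEMMAS AND PROOFS =====

-- Specification-side split on a single space, defined structurally.
def mySplit : List Char → List (List Char)
  | [] => [[]]
  | c :: rest =>
    if c = ' ' then [] :: mySplit rest
    else (c :: (mySplit rest).headD []) :: (mySplit rest).tail

-- Per-word capitalization, as A performs it.
def cap : List Char → List Char
  | [] => []
  | c :: rest => PySem.Chars.upperChar c :: PySem.Chars.lower rest

-- What B's scan computes, as a structural recursion on the characters.
def altSpec : Bool → List Char → List Char
  | _, [] => []
  | start, c :: rest =>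
    if c = ' ' then ' ' :: altSpec true rest
    else (if start then PySem.Chars.upperChar c else PySem.Chars.lowerChar c) :: altSpec false rest

lemma mySplit_ne_nil (cs : List Char) : mySplit cs ≠ [] := by
  cases cs with
  | nil => simp [mySplit]
  | cons c r => simp only [mySplit]; split <;> simp

lemma mySplit_head_tail (cs : List Char) :
    mySplit cs = (mySplit cs).headD [] :: (mySplit cs).tail := by
  cases h : mySplit cs with
  | nil => exact absurd h (mySplit_ne_nil cs)
  | cons a t => simp

-- A's split(' ') computes mySplit: invariant of splitOn's fuelled worker.
lemma go_eq (fuel : Nat) : ∀ (l cur : List Char) (accs : List (List Char)),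
    l.length < fuel →
    PySem.Chars.splitOn.go [' '] fuel l cur accs =
      accs.reverse ++ (cur.reverse ++ (mySplit l).headD []) :: (mySplit l).tail := by
  induction fuel with
  | zero => intro l cur accs h; omega
  | succ n ih =>
    intro l cur accs h
    cases l with
    | nil => simp [PySem.Chars.splitOn.go, mySplit]
    | cons c rest =>
      rw [PySem.Chars.splitOn.go]
      by_cases hc : c = ' '
      · have hp : [' '].isPrefixOf (c :: rest) = true := by simp [List.isPrefixOf, hc]
        rw [if_pos hp]
        simp only [List.length_singleton, List.drop_succ_cons, List.drop_zero]
        rw [ih rest [] (cur.reverse :: accs) (by simp at h; omega)]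
        have hm : mySplit (c :: rest) = [] :: mySplit rest := by rw [hc]; simp [mySplit]
        rw [hm]
        conv_rhs => rw [mySplit_head_tail rest]
        simp
      · have hp : [' '].isPrefixOf (c :: rest) = false := by simp [List.isPrefixOf]; exact fun e => hc e.symm
        rw [if_neg (by simp [hp])]
        rw [ih rest (c :: cur) accs (by simp at h; omega)]
        simp [mySplit, hc]

lemma splitOn_eq (cs : List Char) :
    PySem.Chars.splitOn cs [' '] = mySplit cs := by
  rw [PySem.Chars.splitOn, go_eq (cs.length + 1) cs [] [] (by omega)]
  simp only [List.reverse_nil, List.nil_append]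
  exact (mySplit_head_tail cs).symm

-- B's scan, in both flag states, against the word decomposition.
lemma altSpec_eq (cs : List Char) :
    (altSpec true cs = cap ((mySplit cs).headD []) ++ (mySplit cs).tail.flatMap (fun w => ' ' :: cap w)) ∧
    (altSpec false cs = PySem.Chars.lower ((mySplit cs).headD []) ++ (mySplit cs).tail.flatMap (fun w => ' ' :: cap w)) := by
  induction cs with
  | nil => simp [altSpec, mySplit, cap, PySem.Chars.lower]
  | cons c rest ih =>
    by_cases h : c = ' '
    · constructor <;>
      · simp only [altSpec, mySplit, h, if_true]
        rw [ih.1, mySplit_head_tail rest]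
        simp [cap, PySem.Chars.lower]
    · constructor <;>
      · simp only [altSpec, mySplit, h, if_false]
        rw [ih.2]
        simp [cap, PySem.Chars.lower]

lemma join_space (x : List Char) (xs : List (List Char)) :
    PySem.Chars.join [' '] (x :: xs) = x ++ xs.flatMap (fun w => ' ' :: w) := by
  induction xs generalizing x with
  | nil => simp [PySem.Chars.join_singleton]
  | cons y ys ih => rw [PySem.Chars.join_cons_cons, ih y]; simp

lemma foldlB (cs : List Char) : ∀ (acc : List Char) (start : Bool),
    (cs.foldl (fun st ch =>
      if ch = ' ' then (st.1 ++ [' '], true)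
      else (st.1 ++ [if st.2 then PySem.Chars.upperChar ch else PySem.Chars.lowerChar ch], false))
      (acc, start)).1 = acc ++ altSpec start cs := by
  induction cs with
  | nil => intro acc start; simp [altSpec]
  | cons c rest ih =>
    intro acc start
    by_cases h : c = ' ' <;> simp [altSpec, h, List.foldl_cons, ih]

lemma foldlA (ws : List (List Char)) (acc : List (List Char)) :
    ws.foldl (fun acc word =>
      match word with
      | [] => acc ++ [word]
      | c :: rest => acc ++ [PySem.Chars.upperChar c :: PySem.Chars.lower rest]) acc
    = acc ++ ws.map cap := by
  have : (fun (acc : List (List Char)) (word : List Char) =>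
      match word with
      | [] => acc ++ [word]
      | c :: rest => acc ++ [PySem.Chars.upperChar c :: PySem.Chars.lower rest])
      = fun acc word => acc ++ [cap word] := by
    funext acc word; cases word <;> rfl
  rw [this, PySem.List.foldl_append_singleton_eq_map]

-- ===== VERDICT (by name: the statement is the Claim_ definition above) =====
theorem solution_spec : Claim_equal_solution := by
  intro s _
  unfold Spec_solution solution solution_alt
  simp only [foldlA, foldlB, splitOn_eq, List.nil_append]
  rw [(altSpec_eq s.toList).1]
  rw [mySplit_head_tail s.toList]
  simp only [join_space, List.map_cons, List.headD_cons, List.tail_cons, List.flatMap_map]
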